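-- pv_equiv track=rewrite | github.com/makskliczkowski/general_python | ml/net_impl/networks/net_approx_symmetric.py | _plaquette_adjacency
-- ===== SOURCE A (Python) =====
-- from    typing import Any, Callable, Dict, List, Optional, Sequence, Tuple
--
-- def _plaquette_adjacency(plaquettes: Sequence[Sequence[int]]) -> List[List[int]]:
--     """Dual-graph adjacency: plaquettes sharing at least two spins are neighbors."""
--
--     n_plaq  = len(plaquettes)
--     sets    = [set(p) for p in plaquettes]
--     adj     = [set() for _ in range(n_plaq)]
--
--     for i in range(n_plaq):
--         for j in range(i + 1, n_plaq):
--             if len(sets[i].intersection(sets[j])) >= 2: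
--                 adj[i].add(j)
--                 adj[j].add(i)
--
--     return [sorted(a) for a in adj]
-- ===== SOURCE B (Python) =====
-- from typing import List, Sequence
--
-- def _plaquette_adjacency(plaquettes: Sequence[Sequence[int]]) -> List[List[int]]:
--     """Dual-graph adjacency via an inverted spin->plaquette index: for each
--     plaquette, count co-occurrences with every plaquette sharing a spin and
--     keep those sharing at least two distinct spins."""
--     index = {}
--     for j, p in enumerate(plaquettes):
--         for s in dict.fromkeys(p):          # distinct spins, deterministic order
--             index.setdefault(s, []).append(j)
--     adj = []
--     for i, p in enumerate(plaquettes):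
--         cnt = {}
--         for s in dict.fromkeys(p):
--             for j in index[s]:
--                 cnt[j] = cnt.get(j, 0) + 1
--         adj.append(sorted(j for j, c in cnt.items() if c >= 2 and j != i))
--     return adj
-- ===== Notes on version B (the rewrite author's own statement) =====
-- stated objective: faster
-- what changed: Replaces A's all-pairs set-intersection scan (for every pair i<j intersect the two spin sets) by an inverted spin-to-plaquette index: each plaquette's co-occurrence counts with other plaquettes are accumulated only over plaquettes actually sharing a spin, and pairs with count >= 2 are kept.
import Mathlib
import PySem

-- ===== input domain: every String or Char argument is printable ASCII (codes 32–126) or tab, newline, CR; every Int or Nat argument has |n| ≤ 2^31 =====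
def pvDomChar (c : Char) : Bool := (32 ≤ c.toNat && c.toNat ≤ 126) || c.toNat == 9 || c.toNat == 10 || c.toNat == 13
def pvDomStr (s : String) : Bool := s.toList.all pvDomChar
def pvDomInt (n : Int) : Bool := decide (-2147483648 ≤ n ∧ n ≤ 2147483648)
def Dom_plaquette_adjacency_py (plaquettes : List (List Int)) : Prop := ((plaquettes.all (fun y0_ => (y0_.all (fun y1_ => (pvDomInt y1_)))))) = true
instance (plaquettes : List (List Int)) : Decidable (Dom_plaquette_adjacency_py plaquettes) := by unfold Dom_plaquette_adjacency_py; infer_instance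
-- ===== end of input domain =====

-- B replaces A's all-pairs set-intersection scan by an inverted spin→plaquette index
-- with co-occurrence counting; the return value is proved identical on every input.

-- ===== PORT A =====
-- literal port of _plaquette_adjacency: nested loops over range(n_plaq);
-- loop indices come from range(n_plaq), hence are nonnegative, so .toNat is exact here.
def plaquette_adjacency_py (plaquettes : List (List Int)) : List (List Int) :=
  let n_plaq : Int := PySem.List.len plaquettes
  let sets : List (PySem.Set Int) := plaquettes.map (fun p => PySem.Set.ofList p)
  let adj0 : List (PySem.Set Int) := (PySem.List.pyRange 0 n_plaq).map (fun _ => PySem.Set.empty)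
  let adj := (PySem.List.pyRange 0 n_plaq).foldl (fun adj i =>
    (PySem.List.pyRange (i + 1) n_plaq).foldl (fun adj j =>
      if 2 ≤ PySem.Set.len (PySem.Set.inter (sets.getD i.toNat []) (sets.getD j.toNat [])) then
        let adj1 := adj.set i.toNat (PySem.Set.add (adj.getD i.toNat []) j)
        adj1.set j.toNat (PySem.Set.add (adj1.getD j.toNat []) i)
      else adj) adj) adj0
  adj.map (fun a => PySem.List.sorted a (fun x => x))

-- ===== PORT B =====
-- port of Source B: inverted index spin → plaquette ids (dict.fromkeys = PySem.List.dedup;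
-- index[s] is looked up only for spins s that were inserted, so getD _ [] is exact).
def plaquette_adjacency_py_alt (plaquettes : List (List Int)) : List (List Int) :=
  let index : PySem.Dict Int (List Int) :=
    (PySem.List.enumerate plaquettes).foldl (fun d jp =>
      (PySem.List.dedup jp.2).foldl (fun d s => d.modify s [] (fun l => l ++ [jp.1])) d)
      PySem.Dict.empty
  (PySem.List.enumerate plaquettes).map (fun ip =>
    let cnt : PySem.Dict Int Int :=
      (PySem.List.dedup ip.2).foldl (fun c s =>
        (index.getD s []).foldl (fun c j => c.insert j (c.getD j 0 + 1)) c)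
        PySem.Dict.empty
    PySem.List.sorted ((cnt.items.filter (fun jc => decide (2 ≤ jc.2) && (jc.1 != ip.1))).map (fun jc => jc.1)) (fun x => x))

-- ===== PRECONDITION & SPEC =====
def Spec_plaquette_adjacency_py (plaquettes : List (List Int)) (out : List (List Int)) : Prop := out = plaquette_adjacency_py_alt plaquettes
instance (plaquettes : List (List Int)) (out : List (List Int)) : Decidable (Spec_plaquette_adjacency_py plaquettes out) := by unfold Spec_plaquette_adjacency_py; infer_instance

-- ===== CLAIM (what is proved, stated in full; the proofs are below) =====
def Claim_equal_plaquette_adjacency_py : Prop := ∀ (plaquettes : List (List Int)), Dom_plaquette_adjacency_py plaquettes → Spec_plaquette_adjacency_py plaquettes (plaquette_adjacency_py plaquettes)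

-- ===== LEMMAS AND PROOFS =====

-- "plaquettes i and j share at least two spins" (both ports' criterion)
def sharesB (p q : List Int) : Bool :=
  decide (2 ≤ (PySem.Set.inter (PySem.Set.ofList p) (PySem.Set.ofList q)).length)

-- the canonical (strictly increasing) neighbour row of plaquette i
def canon (pl : List (List Int)) (i : Nat) : List Int :=
  ((List.range pl.length).filter
    (fun j => decide (j ≠ i) && sharesB (pl.getD i []) (pl.getD j []))).map (fun j : Nat => (j : Int))

-- pair (a,b), a = min, b = max, already processed after outer rounds < t and,
-- in outer round t, inner indices < m
def doneB (t m a b : Nat) : Bool := decide (a < t ∨ (a = t ∧ b < m))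

-- A's adjacency set of plaquette k at stage (t, m)
def rowA (pl : List (List Int)) (t m k : Nat) : List Int :=
  ((List.range pl.length).filter
    (fun j => decide (j ≠ k) && sharesB (pl.getD k []) (pl.getD j []) && doneB t m (min k j) (max k j))).map
    (fun j : Nat => (j : Int))

def stage (pl : List (List Int)) (t m : Nat) : List (PySem.Set Int) :=
  (List.range pl.length).map (fun k => rowA pl t m k)

-- A's inner-loop body, on Nat indices
def stepA (pl : List (List Int)) (i j : Nat) (adj : List (PySem.Set Int)) : List (PySem.Set Int) :=
  if sharesB (pl.getD i []) (pl.getD j []) then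
    (adj.set i (PySem.Set.add (adj.getD i []) (j : Int))).set j
      (PySem.Set.add ((adj.set i (PySem.Set.add (adj.getD i []) (j : Int))).getD j []) (i : Int))
  else adj

lemma sharesB_symm (p q : List Int) : sharesB p q = sharesB q p := by
  unfold sharesB
  have h : (PySem.Set.inter (PySem.Set.ofList p) (PySem.Set.ofList q)).length
      = (PySem.Set.inter (PySem.Set.ofList q) (PySem.Set.ofList p)).length := by
    apply List.Perm.length_eq
    rw [List.perm_ext_iff_of_nodup
      (PySem.Set.nodup_inter _ _ (PySem.Set.nodup_ofList p))
      (PySem.Set.nodup_inter _ _ (PySem.Set.nodup_ofList q))]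
    intro a
    simp only [PySem.Set.mem_inter]
    tauto
  rw [h]

lemma pyRange_natCast_aux (d a : Nat) :
    PySem.List.pyRange (a : Int) ((a + d : Nat) : Int) = (List.range' a d).map (fun k : Nat => (k : Int)) := by
  induction d generalizing a with
  | zero =>
    rw [show ((List.range' a 0).map (fun k : Nat => (k : Int))) = [] from rfl]
    rw [List.eq_nil_iff_forall_not_mem]
    intro x hx
    have := PySem.List.mem_pyRange_one.mp hx
    omega
  | succ d ih =>
    rw [PySem.List.pyRange_one_cons (by push_cast; omega)]
    rw [List.range'_succ, List.map_cons]
    congr 1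
    have h1 : (a : Int) + 1 = ((a + 1 : Nat) : Int) := by push_cast; ring
    rw [h1, show (a + (d+1)) = ((a+1) + d) by omega]
    exact ih (a+1)

lemma pyRange_natCast_eq (a b : Nat) :
    PySem.List.pyRange (a : Int) (b : Int) = (List.range' a (b - a)).map (fun k : Nat => (k : Int)) := by
  rcases Nat.le_total b a with h | h
  · rw [show b - a = 0 by omega]
    rw [show ((List.range' a 0).map (fun k : Nat => (k : Int))) = [] from rfl]
    rw [List.eq_nil_iff_forall_not_mem]
    intro x hx
    have := PySem.List.mem_pyRange_one.mp hx
    omega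
  · rw [show (b : Int) = ((a + (b - a) : Nat) : Int) by push_cast; omega]
    exact pyRange_natCast_aux (b - a) a

lemma map_range_set {β : Type} (f : Nat → β) (n i : Nat) (hi : i < n) (v : β) :
    ((List.range n).map f).set i v = (List.range n).map (fun k => if k = i then v else f k) := by
  apply List.ext_getElem?
  intro j
  by_cases hj : j < n
  · by_cases h : i = j
    · subst h
      simp [List.getElem?_set, List.length_map, List.length_range, hi, hj, List.getElem?_range hj]
    · simp [List.getElem?_set, h, List.getElem?_range hj, Ne.symm h]
  · have h2 : ((List.range n).map f).length ≤ j := by simp [Nat.not_lt.mp hj]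
    have h3 : ((List.range n).map (fun k => if k = i then v else f k)).length ≤ j := by simp [Nat.not_lt.mp hj]
    rw [List.getElem?_eq_none (by simpa using h2), List.getElem?_eq_none h3]

lemma filter_range_flip (n j : Nat) (p p' : Nat → Bool) (hj : j < n)
    (h : ∀ k, k ≠ j → p' k = p k) (hpj : p j = false) (hp'j : p' j = true)
    (hhigh : ∀ k, j < k → p k = false) :
    (List.range n).filter p' = (List.range n).filter p ++ [j] := by
  have hsplit : List.range n = List.range (j + 1) ++ List.range' (j + 1) (n - (j + 1)) := by
    rw [List.range_eq_range', List.range_eq_range']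
    rw [show n = (j + 1) + (n - (j + 1)) by omega]
    rw [← List.range'_append (s := 0) (m := j + 1) (n := n - (j + 1)) (step := 1)]
    congr 2 <;> omega
  have hhigh' : ∀ q0 : Nat → Bool, (∀ k, j < k → q0 k = false) →
      (List.range' (j + 1) (n - (j + 1))).filter q0 = [] := by
    intro q0 hq0
    apply List.filter_eq_nil_iff.mpr
    intro k hk
    have := List.mem_range'_1.mp hk
    simp [hq0 k (by omega)]
  have hp'high : ∀ k, j < k → p' k = false := fun k hk => by
    rw [h k (by omega), hhigh k hk]
  rw [hsplit, List.filter_append, List.filter_append,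
      hhigh' p hhigh, hhigh' p' hp'high, List.range_succ,
      List.filter_append, List.filter_append]
  have hlow : (List.range j).filter p' = (List.range j).filter p := by
    apply List.filter_congr
    intro k hk
    exact h k (by have := List.mem_range.mp hk; omega)
  rw [hlow]
  simp [hpj, hp'j]

lemma rowA_zero (pl : List (List Int)) (k : Nat) : rowA pl 0 1 k = [] := by
  unfold rowA
  rw [List.filter_eq_nil_iff.mpr]
  · rfl
  · intro j hj hcontra
    simp only [doneB, Bool.and_eq_true, decide_eq_true_eq] at hcontra
    obtain ⟨⟨hjk, _⟩, hdone⟩ := hcontra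
    omega

lemma rowA_full (pl : List (List Int)) (m k : Nat) (hk : k < pl.length) :
    rowA pl pl.length m k = canon pl k := by
  unfold rowA canon
  congr 1
  apply List.filter_congr
  intro j hj
  have hjn := List.mem_range.mp hj
  have hd : doneB pl.length m (min k j) (max k j) = true := by
    simp only [doneB, decide_eq_true_eq]
    omega
  rw [hd, Bool.and_true]

lemma rowA_succ_other (pl : List (List Int)) (i j k : Nat) (hij : i < j)
    (hki : k ≠ i) (hkj : k ≠ j) : rowA pl i (j + 1) k = rowA pl i j k := by
  unfold rowA
  congr 1
  apply List.filter_congr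
  intro j' _
  by_cases h1 : j' = k
  · simp [h1]
  · have hd : doneB i (j + 1) (min k j') (max k j') = doneB i j (min k j') (max k j') := by
      simp only [doneB, decide_eq_decide]
      omega
    rw [hd]

lemma rowA_succ_noshare (pl : List (List Int)) (i j k : Nat) (hij : i < j)
    (hs : sharesB (pl.getD i []) (pl.getD j []) = false) :
    rowA pl i (j + 1) k = rowA pl i j k := by
  unfold rowA
  congr 1
  apply List.filter_congr
  intro j' _
  by_cases h1 : j' = k
  · simp [h1]
  · by_cases hd : min k j' = i ∧ max k j' = j
    · have hsf : sharesB (pl.getD k []) (pl.getD j' []) = false := by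
        rcases Nat.le_total k j' with hkk | hkk
        · have e1 : k = i := by omega
          have e2 : j' = j := by omega
          rw [e1, e2]; exact hs
        · have e1 : k = j := by omega
          have e2 : j' = i := by omega
          rw [e1, e2, sharesB_symm]; exact hs
      simp only [List.getD_eq_getElem?_getD] at hsf
      simp [hsf]
    · have hdd : doneB i (j + 1) (min k j') (max k j') = doneB i j (min k j') (max k j') := by
        simp only [doneB, decide_eq_decide]
        omega
      rw [hdd]

lemma not_mem_rowA_lo (pl : List (List Int)) (i j : Nat) (hij : i < j) :
    (j : Int) ∉ rowA pl i j i := by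
  intro hmem
  simp only [rowA, List.mem_map, List.mem_filter, List.mem_range] at hmem
  obtain ⟨j', ⟨_, hcond⟩, hcast⟩ := hmem
  have hji : j' = j := by exact_mod_cast hcast
  subst hji
  simp only [Bool.and_eq_true, decide_eq_true_eq, doneB] at hcond
  omega

lemma not_mem_rowA_hi (pl : List (List Int)) (i j : Nat) (hij : i < j) :
    (i : Int) ∉ rowA pl i j j := by
  intro hmem
  simp only [rowA, List.mem_map, List.mem_filter, List.mem_range] at hmem
  obtain ⟨j', ⟨_, hcond⟩, hcast⟩ := hmem
  have hji : j' = i := by exact_mod_cast hcast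
  subst hji
  simp only [Bool.and_eq_true, decide_eq_true_eq, doneB] at hcond
  omega

lemma rowA_succ_self_lo (pl : List (List Int)) (i j : Nat) (hij : i < j) (hj : j < pl.length)
    (hs : sharesB (pl.getD i []) (pl.getD j []) = true) :
    rowA pl i (j + 1) i = rowA pl i j i ++ [(j : Int)] := by
  unfold rowA
  rw [show [(j : Int)] = (List.map (fun k : Nat => (k : Int)) [j]) from rfl, ← List.map_append]
  congr 1
  apply filter_range_flip pl.length j _ _ hj
  · intro k' hk'
    by_cases hki : k' = i
    · simp [hki]
    · have hdd : doneB i (j + 1) (min i k') (max i k') = doneB i j (min i k') (max i k') := by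
        simp only [doneB, decide_eq_decide]
        omega
      rw [hdd]
  · have hdd : doneB i j (min i j) (max i j) = false := by
      simp only [doneB, decide_eq_false_iff_not]
      omega
    simp [hdd]
  · simp only [Bool.and_eq_true, decide_eq_true_eq]
    refine ⟨⟨by omega, hs⟩, ?_⟩
    simp only [doneB, decide_eq_true_eq]
    omega
  · intro k' hk'
    have hdd : doneB i j (min i k') (max i k') = false := by
      simp only [doneB, decide_eq_false_iff_not]
      omega
    simp [hdd]

lemma rowA_succ_self_hi (pl : List (List Int)) (i j : Nat) (hij : i < j) (hi : i < pl.length)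
    (hs : sharesB (pl.getD i []) (pl.getD j []) = true) :
    rowA pl i (j + 1) j = rowA pl i j j ++ [(i : Int)] := by
  unfold rowA
  rw [show [(i : Int)] = (List.map (fun k : Nat => (k : Int)) [i]) from rfl, ← List.map_append]
  congr 1
  apply filter_range_flip pl.length i _ _ hi
  · intro k' hk'
    by_cases hkj : k' = j
    · simp [hkj]
    · have hdd : doneB i (j + 1) (min j k') (max j k') = doneB i j (min j k') (max j k') := by
        simp only [doneB, decide_eq_decide]
        omega
      rw [hdd]
  · have hdd : doneB i j (min j i) (max j i) = false := by
      simp only [doneB, decide_eq_false_iff_not]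
      omega
    simp [hdd]
  · simp only [Bool.and_eq_true, decide_eq_true_eq]
    refine ⟨⟨by omega, by rw [sharesB_symm]; exact hs⟩, ?_⟩
    simp only [doneB, decide_eq_true_eq]
    omega
  · intro k' hk'
    by_cases hkj : k' = j
    · simp [hkj]
    · have hdd : doneB i j (min j k') (max j k') = false := by
        simp only [doneB, decide_eq_false_iff_not]
        omega
      simp [hdd]

lemma stepA_stage (pl : List (List Int)) (i j : Nat) (hij : i < j) (hj : j < pl.length) :
    stepA pl i j (stage pl i j) = stage pl i (j + 1) := by
  have hi : i < pl.length := lt_trans hij hj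
  unfold stepA
  by_cases hs : sharesB (pl.getD i []) (pl.getD j []) = true
  · rw [if_pos hs]
    unfold stage
    rw [PySem.List.getD_map_range _ _ _ _ hi, map_range_set _ _ _ hi,
        PySem.List.getD_map_range _ _ _ _ hj, map_range_set _ _ _ hj]
    apply List.map_congr_left
    intro k hk
    by_cases hkj : k = j
    · subst hkj
      rw [if_pos rfl, if_neg (by omega : k ≠ i)]
      rw [PySem.Set.add_of_not_mem (not_mem_rowA_hi pl i k hij)]
      exact (rowA_succ_self_hi pl i k hij hi hs).symm
    · rw [if_neg hkj]
      by_cases hki : k = i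
      · subst hki
        rw [if_pos rfl]
        rw [PySem.Set.add_of_not_mem (not_mem_rowA_lo pl k j hij)]
        exact (rowA_succ_self_lo pl k j hij hj hs).symm
      · rw [if_neg hki]
        exact (rowA_succ_other pl i j k hij hki hkj).symm
  · rw [if_neg hs]
    unfold stage
    apply List.map_congr_left
    intro k hk
    exact (rowA_succ_noshare pl i j k hij (Bool.not_eq_true _ ▸ hs : _)).symm

lemma inner_fold (pl : List (List Int)) (i m : Nat) (hi : i < pl.length) (him : i < m)
    (hm : m ≤ pl.length) :
    (List.range' (i + 1) (m - (i + 1))).foldl (fun adj j => stepA pl i j adj) (stage pl i (i + 1))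
      = stage pl i m := by
  obtain ⟨d, rfl⟩ : ∃ d, m = (i + 1) + d := ⟨m - (i + 1), by omega⟩
  induction d with
  | zero => simp
  | succ d ih =>
    rw [show (i + 1) + (d + 1) - (i + 1) = d + 1 by omega, List.range'_concat,
        List.foldl_append]
    rw [show (i + 1) + 1 * d = (i + 1) + d by omega]
    rw [show (i + 1) + d - (i + 1) = d from by omega] at ih
    rw [ih (by omega) (by omega)]
    have := stepA_stage pl i ((i + 1) + d) (by omega) (by omega)
    simpa [show (i + 1) + d + 1 = (i + 1) + (d + 1) by omega] using this

lemma stage_init (pl : List (List Int)) :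
    stage pl 0 1 = (List.range pl.length).map (fun _ => ([] : PySem.Set Int)) := by
  unfold stage
  apply List.map_congr_left
  intro k _
  exact rowA_zero pl k

lemma stage_shift (pl : List (List Int)) (t : Nat) :
    stage pl t pl.length = stage pl (t + 1) (t + 2) := by
  unfold stage
  apply List.map_congr_left
  intro k hkmem
  have hkn := List.mem_range.mp hkmem
  unfold rowA
  congr 1
  apply List.filter_congr
  intro j hj
  have hjn := List.mem_range.mp hj
  by_cases h1 : j = k
  · simp [h1]
  · have hd : doneB t pl.length (min k j) (max k j) = doneB (t + 1) (t + 2) (min k j) (max k j) := by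
      simp only [doneB, decide_eq_decide]
      omega
    rw [hd]

lemma outer_fold (pl : List (List Int)) (t : Nat) (ht : t ≤ pl.length) :
    (List.range t).foldl (fun adj i =>
        (List.range' (i + 1) (pl.length - (i + 1))).foldl (fun adj j => stepA pl i j adj) adj)
      (stage pl 0 1) = stage pl t (t + 1) := by
  induction t with
  | zero => simp
  | succ t ih =>
    rw [List.range_succ, List.foldl_append, ih (by omega)]
    simp only [List.foldl_cons, List.foldl_nil]
    rw [inner_fold pl t pl.length (by omega) (by omega) (by omega)]
    exact stage_shift pl t

lemma canon_pairwise (pl : List (List Int)) (i : Nat) :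
    (canon pl i).Pairwise (fun a b => a < b) := by
  unfold canon
  apply List.Pairwise.map
  · intro a b hab
    exact_mod_cast hab
  · exact List.Pairwise.filter _ List.pairwise_lt_range

lemma canon_nodup (pl : List (List Int)) (i : Nat) : (canon pl i).Nodup :=
  (canon_pairwise pl i).imp (fun h => ne_of_lt h)

lemma getD_map_ofList (pl : List (List Int)) (i : Nat) (hi : i < pl.length) :
    (pl.map (fun p => PySem.Set.ofList p)).getD i [] = PySem.Set.ofList (pl.getD i []) := by
  rw [List.getD_eq_getElem _ _ (by simpa using hi), List.getD_eq_getElem _ _ hi, List.getElem_map]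

lemma A_master (pl : List (List Int)) :
    plaquette_adjacency_py pl = (List.range pl.length).map (canon pl) := by
  simp only [plaquette_adjacency_py, PySem.List.len]
  rw [PySem.List.pyRange_zero_natCast, List.map_map, List.foldl_map]
  rw [PySem.List.foldl_congr_mem _ _
    (fun adj it => (List.range' (it + 1) (pl.length - (it + 1))).foldl
      (fun adj j => stepA pl it j adj) adj) _ ?_]
  · have hinit : (List.range pl.length).map
        ((fun _ => (PySem.Set.empty : PySem.Set Int)) ∘ (fun k : Nat => (k : Int)))
        = stage pl 0 1 := by
      rw [stage_init]
      rfl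
    rw [hinit, outer_fold pl pl.length le_rfl]
    unfold stage
    rw [List.map_map]
    apply List.map_congr_left
    intro k hk
    have hkn := List.mem_range.mp hk
    show PySem.List.sorted (rowA pl pl.length (pl.length + 1) k) (fun x => x) = canon pl k
    rw [rowA_full pl (pl.length + 1) k hkn]
    exact PySem.List.sorted_eq_self_of_pairwise _ _
      ((canon_pairwise pl k).imp (fun h => le_of_lt h))
  · intro adj it hit
    have hitn := List.mem_range.mp hit
    rw [show ((it : Int) + 1) = ((it + 1 : Nat) : Int) by push_cast; ring]
    rw [pyRange_natCast_eq (it + 1) pl.length, List.foldl_map]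
    apply PySem.List.foldl_congr_mem
    intro acc jt hjt
    have hjtn : it + 1 ≤ jt ∧ jt < pl.length := by
      have := List.mem_range'_1.mp hjt
      omega
    simp only [Int.toNat_natCast]
    rw [getD_map_ofList pl it (by omega), getD_map_ofList pl jt (by omega)]
    by_cases hc : 2 ≤ (PySem.Set.inter (PySem.Set.ofList (pl.getD it []))
        (PySem.Set.ofList (pl.getD jt []))).length
    · rw [if_pos (show (2:Int) ≤ _ by simp only [PySem.Set.len]; exact_mod_cast hc)]
      unfold stepA
      rw [if_pos (by simpa [sharesB] using hc)]
    · rw [if_neg (show ¬ (2:Int) ≤ _ by simp only [PySem.Set.len]; exact_mod_cast hc)]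
      unfold stepA
      rw [if_neg (by simpa [sharesB] using hc)]

-- ---------- B side ----------

def indexD (pl : List (List Int)) : PySem.Dict Int (List Int) :=
  (PySem.List.enumerate pl).foldl (fun d jp =>
    (PySem.List.dedup jp.2).foldl (fun d s => d.modify s [] (fun l => l ++ [jp.1])) d)
    PySem.Dict.empty

def Mlist (pl : List (List Int)) (p : List Int) : List Int :=
  (PySem.List.dedup p).flatMap (fun s => (indexD pl).getD s [])

lemma nodup_filter_beq (xs : List Int) (s : Int) (h : xs.Nodup) :
    xs.filter (fun y => y == s) = if s ∈ xs then [s] else [] := by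
  induction xs with
  | nil => simp
  | cons x xs ih =>
    rcases List.nodup_cons.mp h with ⟨hx, hxs⟩
    by_cases hxe : x = s
    · subst hxe
      rw [List.filter_cons_of_pos (by simp)]
      have h0 : xs.filter (fun y => y == x) = [] := by
        rw [ih hxs]
        simp [hx]
      simp [h0]
    · rw [List.filter_cons_of_neg (by simp [hxe])]
      rw [ih hxs]
      by_cases hmem : s ∈ xs
      · simp [hmem]
      · simp [hmem, Ne.symm hxe]

lemma sum_map_ite_nat {α : Type} (p : α → Bool) (l : List α) :
    (l.map (fun x => if p x = true then (1 : Nat) else 0)).sum = l.countP p := by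
  induction l with
  | nil => rfl
  | cons x l ih =>
    rw [List.map_cons, List.sum_cons, ih, List.countP_cons]
    by_cases hp : p x = true <;> simp [hp, Nat.add_comm]

lemma flat_filter (E : List (Int × List Int)) (s : Int) :
    ((E.flatMap (fun jp => (PySem.List.dedup jp.2).map (fun s' => (s', jp.1)))).filter
        (fun p => p.1 == s)).map (fun p => p.2)
    = (E.filter (fun jp => decide (s ∈ jp.2))).map (fun jp => jp.1) := by
  induction E with
  | nil => rfl
  | cons jp E ih =>
    rw [List.flatMap_cons, List.filter_append, List.map_append, ih, List.filter_map]
    have hcomp : ((fun (p : Int × Int) => p.1 == s) ∘ (fun s' : Int => (s', jp.1)))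
        = (fun y => y == s) := rfl
    rw [hcomp, nodup_filter_beq (PySem.List.dedup jp.2) s (show (PySem.List.dedup jp.2).Nodup from PySem.Set.nodup_ofList jp.2)]
    by_cases hm : s ∈ jp.2
    · have hm' : s ∈ PySem.List.dedup jp.2 := (PySem.Set.mem_ofList jp.2 s).mpr hm
      rw [if_pos hm', List.filter_cons_of_pos (by simpa using hm)]
      simp
    · have hm' : s ∉ PySem.List.dedup jp.2 := fun hc => hm ((PySem.Set.mem_ofList jp.2 s).mp hc)
      rw [if_neg hm', List.filter_cons_of_neg (by simpa using hm)]
      simp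

lemma indexD_getD (pl : List (List Int)) (s : Int) :
    (indexD pl).getD s [] =
      ((PySem.List.enumerate pl).filter (fun jp => decide (s ∈ jp.2))).map (fun jp => jp.1) := by
  unfold indexD
  have h1 : (fun (d : PySem.Dict Int (List Int)) (jp : Int × List Int) =>
      (PySem.List.dedup jp.2).foldl (fun d s => d.modify s [] (fun l => l ++ [jp.1])) d)
      = fun (d : PySem.Dict Int (List Int)) (jp : Int × List Int) =>
        ((PySem.List.dedup jp.2).map (fun s' => (s', jp.1))).foldl
          (fun d p => d.modify p.1 [] (fun l => l ++ [p.2])) d := by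
    funext d jp
    rw [List.foldl_map]
  rw [h1, ← List.foldl_flatMap, PySem.Dict.getD_foldl_modify_append,
      PySem.Dict.getD_empty, List.nil_append, flat_filter]

lemma mem_indexD (pl : List (List Int)) (s j : Int) :
    j ∈ (indexD pl).getD s [] ↔ ∃ k : Nat, k < pl.length ∧ j = (k : Int) ∧ s ∈ pl.getD k [] := by
  rw [indexD_getD]
  simp only [List.mem_map, List.mem_filter, PySem.List.mem_enumerate_iff]
  constructor
  · rintro ⟨jp, ⟨⟨k, hk, rfl⟩, hs⟩, rfl⟩
    refine ⟨k, hk, by simp, ?_⟩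
    rw [List.getD_eq_getElem _ _ hk]
    simpa using hs
  · rintro ⟨k, hk, rfl, hsm⟩
    refine ⟨((0 : Int) + (k : Int), pl[k]), ⟨⟨k, hk, rfl⟩, ?_⟩, by simp⟩
    rw [List.getD_eq_getElem _ _ hk] at hsm
    simpa using hsm

lemma nodup_indexD (pl : List (List Int)) (s : Int) : ((indexD pl).getD s []).Nodup := by
  rw [indexD_getD]
  have hp := (PySem.List.pairwise_lt_enumerate pl 0).filter (fun jp => decide (s ∈ jp.2))
  have := List.Pairwise.map (S := fun a b : Int => a < b) (fun jp : Int × List Int => jp.1) (fun a b h => h) hp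
  exact this.imp (fun h => ne_of_lt h)

lemma count_indexD (pl : List (List Int)) (s : Int) (k : Nat) (hk : k < pl.length) :
    ((indexD pl).getD s []).count (k : Int) = if s ∈ pl.getD k [] then 1 else 0 := by
  by_cases hm : s ∈ pl.getD k []
  · rw [if_pos hm]
    exact List.count_eq_one_of_mem (nodup_indexD pl s)
      ((mem_indexD pl s (k : Int)).mpr ⟨k, hk, rfl, hm⟩)
  · rw [if_neg hm, List.count_eq_zero]
    intro hmem
    obtain ⟨k', hk', hkk, hs'⟩ := (mem_indexD pl s (k : Int)).mp hmem
    have hkeq : k' = k := by exact_mod_cast hkk.symm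
    subst hkeq
    exact hm hs' 

lemma count_Mlist (pl : List (List Int)) (p : List Int) (k : Nat) (hk : k < pl.length) :
    (Mlist pl p).count (k : Int) =
      (PySem.Set.inter (PySem.Set.ofList p) (PySem.Set.ofList (pl.getD k []))).length := by
  unfold Mlist
  rw [List.count_flatMap]
  rw [show (List.count ((k : Nat) : Int) ∘ fun s => (indexD pl).getD s [])
      = (fun s => List.count ((k : Nat) : Int) ((indexD pl).getD s [])) from rfl]
  rw [List.map_congr_left (fun x _ => count_indexD pl x k hk)]
  rw [show (fun x : Int => if x ∈ pl.getD k [] then (1 : Nat) else 0)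
      = (fun x : Int => if decide (x ∈ pl.getD k []) = true then (1 : Nat) else 0) from by
    funext x
    by_cases h : x ∈ pl.getD k [] <;> simp [h]]
  rw [sum_map_ite_nat]
  rw [show (PySem.Set.inter (PySem.Set.ofList p) (PySem.Set.ofList (pl.getD k [])))
      = (PySem.Set.ofList p).filter (fun x => (PySem.Set.ofList (pl.getD k [])).contains x) from rfl]
  rw [← List.countP_eq_length_filter]
  apply List.countP_congr
  intro x _
  simp [PySem.Set.contains_iff, PySem.Set.mem_ofList]

lemma mem_Mlist_cast (pl : List (List Int)) (p : List Int) (j : Int) (hj : j ∈ Mlist pl p) :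
    ∃ k : Nat, k < pl.length ∧ j = (k : Int) := by
  unfold Mlist at hj
  obtain ⟨s, _, hjs⟩ := List.mem_flatMap.mp hj
  obtain ⟨k, hk, hkk, _⟩ := (mem_indexD pl s j).mp hjs
  exact ⟨k, hk, hkk⟩

lemma canon_mem (pl : List (List Int)) (i : Nat) (a : Int) :
    a ∈ canon pl i ↔ ∃ j : Nat, j < pl.length ∧ a = (j : Int) ∧ j ≠ i ∧
      sharesB (pl.getD i []) (pl.getD j []) = true := by
  unfold canon
  simp only [List.mem_map, List.mem_filter, List.mem_range, Bool.and_eq_true, decide_eq_true_eq]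
  constructor
  · rintro ⟨j, ⟨hj, hji, hsh⟩, rfl⟩
    exact ⟨j, hj, rfl, hji, hsh⟩
  · rintro ⟨j, hj, rfl, hji, hsh⟩
    exact ⟨j, ⟨hj, hji, hsh⟩, rfl⟩

lemma rowB_eq_canon (pl : List (List Int)) (i : Nat) (hi : i < pl.length) :
    PySem.List.sorted
      (((PySem.Dict.counter (Mlist pl (pl.getD i []))).items.filter
          (fun jc => decide (2 ≤ jc.2) && (jc.1 != (i : Int)))).map (fun jc => jc.1))
      (fun x => x) = canon pl i := by
  rw [PySem.Dict.items_counter, List.filter_map, List.map_map]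
  rw [show ((fun jc : Int × Int => jc.1) ∘
      (fun k : Int => (k, (List.count k (Mlist pl (pl.getD i [])) : Int)))) = (fun k : Int => k) from rfl]
  rw [List.map_id']
  apply PySem.List.sorted_eq_of_perm_of_pairwise_lt
  · rw [List.perm_ext_iff_of_nodup (canon_nodup pl i)
      (List.Nodup.filter _ (PySem.Set.nodup_ofList (Mlist pl (pl.getD i []))))]
    intro a
    rw [canon_mem]
    simp only [List.mem_filter, PySem.Set.mem_ofList, Function.comp, Bool.and_eq_true,
      decide_eq_true_eq, bne_iff_ne]
    constructor
    · rintro ⟨j, hj, rfl, hji, hsh⟩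
      have h2 : 2 ≤ List.count ((j : Nat) : Int) (Mlist pl (pl.getD i [])) := by
        rw [count_Mlist pl (pl.getD i []) j hj]
        unfold sharesB at hsh
        exact of_decide_eq_true hsh
      refine ⟨List.count_pos_iff.mp (by omega), by exact_mod_cast h2, ?_⟩
      intro hc
      exact hji (by exact_mod_cast hc)
    · rintro ⟨hmem, h2, hne⟩
      obtain ⟨j, hj, rfl⟩ := mem_Mlist_cast pl _ a hmem
      refine ⟨j, hj, rfl, fun hc => hne (by rw [hc]), ?_⟩
      unfold sharesB
      rw [decide_eq_true_eq, ← count_Mlist pl _ j hj]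
      exact_mod_cast h2
  · exact canon_pairwise pl i

lemma B_master (pl : List (List Int)) :
    plaquette_adjacency_py_alt pl = (List.range pl.length).map (canon pl) := by
  simp only [plaquette_adjacency_py_alt]
  rw [show ((PySem.List.enumerate pl).foldl (fun d jp =>
      (PySem.List.dedup jp.2).foldl (fun d s => d.modify s [] (fun l => l ++ [jp.1])) d)
      PySem.Dict.empty) = indexD pl from rfl]
  apply List.ext_getElem
  · simp [PySem.List.length_enumerate]
  intro k h1 h2
  rw [List.getElem_map, List.getElem_map, PySem.List.getElem_enumerate, List.getElem_range]
  have hk : k < pl.length := by simpa [PySem.List.length_enumerate] using h2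
  have hcnt : (PySem.List.dedup (((0 : Int) + (k : Int), pl[k]).2)).foldl
      (fun c s => ((indexD pl).getD s []).foldl (fun c j => c.insert j (c.getD j 0 + 1)) c)
      PySem.Dict.empty = PySem.Dict.counter (Mlist pl pl[k]) := by
    rw [← PySem.Dict.foldl_insert_getD_add_one_eq_counter]
    unfold Mlist
    rw [List.foldl_flatMap]
  rw [hcnt]
  simp only [zero_add]
  rw [← List.getD_eq_getElem pl [] hk]
  exact rowB_eq_canon pl k hk

-- ===== VERDICT (by name: the statement is the Claim_ definition above) =====
theorem plaquette_adjacency_py_spec : Claim_equal_plaquette_adjacency_py := by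
  intro pl _
  unfold Spec_plaquette_adjacency_py
  rw [A_master, B_master]
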